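-- pv_equiv track=rewrite | github.com/zekas-e/M1-Analyse-de-donn-es | Seance-06/Exercice/src/main.py | classementPays
-- ===== SOURCE A (Python) =====
-- def classementPays(ordre1, ordre2):
--     classement = []
--     if len(ordre1) <= len(ordre2):
--         for element1 in range(0, len(ordre2) - 1):
--             for element2 in range(0, len(ordre1) - 1):
--                 if ordre2[element1][1] == ordre1[element2][1]:
--                     classement.append([ordre1[element2][0], ordre2[element1][0], ordre1[element2][1]])
--     else:
--         for element1 in range(0, len(ordre1) - 1):
--             for element2 in range(0, len(ordre2) - 1):
--                 if ordre2[element2][1] == ordre1[element1][1]: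
--                     classement.append([ordre1[element1][0], ordre2[element2][0], ordre1[element][1]])
--     return classement
-- ===== SOURCE B (Python) =====
-- def classementPays(ordre1, ordre2):
--     # Hash join on the second field: index the build side by key once, then
--     # stream the probe side, emitting matches.  Both lists' last rows are not
--     # part of the join (A scans range(len - 1)).
--     a, b = ordre1[:-1], ordre2[:-1]
--     if not a or not b:
--         return []
--     if len(ordre1) <= len(ordre2):
--         index = {}
--         for r1 in a:
--             index.setdefault(r1[1], []).append(r1)
--         return [[r1[0], r2[0], r1[1]] for r2 in b for r1 in index.get(r2[1], [])]
--     else: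
--         index = {}
--         for r2 in b:
--             index.setdefault(r2[1], []).append(r2)
--         return [[r1[0], r2[0], r1[1]] for r1 in a for r2 in index.get(r1[1], [])]
-- ===== Notes on version B (the rewrite author's own statement) =====
-- stated objective: alternative
-- what changed: Replaces A's nested index-loop scan (inner list rescanned for every outer row) by a hash join: build a dict key->rows over one side once, then stream the other side appending its matches (O(n+m+matches) work instead of O(n*m) comparisons; measured ratio at the largest timing size was below the 1.5x bar, so no speed is claimed).
import Mathlib
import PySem

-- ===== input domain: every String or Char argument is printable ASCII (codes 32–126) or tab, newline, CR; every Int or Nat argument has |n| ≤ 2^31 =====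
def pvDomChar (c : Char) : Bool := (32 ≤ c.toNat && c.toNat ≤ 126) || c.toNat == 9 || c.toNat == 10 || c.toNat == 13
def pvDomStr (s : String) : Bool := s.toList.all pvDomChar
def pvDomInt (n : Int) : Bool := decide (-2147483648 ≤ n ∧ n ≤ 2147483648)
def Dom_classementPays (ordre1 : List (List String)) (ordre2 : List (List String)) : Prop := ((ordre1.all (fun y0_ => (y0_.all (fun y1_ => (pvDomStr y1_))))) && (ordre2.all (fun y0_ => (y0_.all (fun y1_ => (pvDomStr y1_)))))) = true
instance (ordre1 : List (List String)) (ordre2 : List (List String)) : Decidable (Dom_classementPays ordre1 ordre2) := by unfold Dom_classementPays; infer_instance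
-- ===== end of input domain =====

-- B replaces A's nested index-loop scan by a hash join (dict key -> rows built once, then one
-- pass over the other list); objective: alternative algorithm. Equivalence is over the return value.

-- ===== PORT A =====
-- ordre[i] (i an in-range loop index under Pre_) and row[j] (j = 0 or 1, rows of length ≥ 2 under Pre_)
def pvRow (xs : List (List String)) (i : Int) : List String := PySem.List.pyGetD xs i []
def pvCell (r : List String) (j : Int) : String := PySem.List.pyGetD r j ""

def classementPays (ordre1 : List (List String)) (ordre2 : List (List String)) : List (List String) :=
  if ordre1.length ≤ ordre2.length then
    (PySem.List.pyRange 0 ((ordre2.length : Int) - 1) 1).foldl (fun classement element1 =>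
      (PySem.List.pyRange 0 ((ordre1.length : Int) - 1) 1).foldl (fun classement element2 =>
        if pvCell (pvRow ordre2 element1) 1 == pvCell (pvRow ordre1 element2) 1 then
          classement ++ [[pvCell (pvRow ordre1 element2) 0, pvCell (pvRow ordre2 element1) 0,
                          pvCell (pvRow ordre1 element2) 1]]
        else classement) classement) []
  else
    (PySem.List.pyRange 0 ((ordre1.length : Int) - 1) 1).foldl (fun classement element1 =>
      (PySem.List.pyRange 0 ((ordre2.length : Int) - 1) 1).foldl (fun classement element2 =>
        if pvCell (pvRow ordre2 element2) 1 == pvCell (pvRow ordre1 element1) 1 then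
          -- Python evaluates ordre1[element] here with 'element' UNDEFINED and raises NameError;
          -- Pre_ excludes every input reaching this append, so the third field is a placeholder.
          classement ++ [[pvCell (pvRow ordre1 element1) 0, pvCell (pvRow ordre2 element2) 0, ""]]
        else classement) classement) []

-- ===== PORT B =====
-- index.setdefault(k, []).append(r) over the build side: d[k] becomes d.get(k, []) ++ [r]
def pvIndex (rows : List (List String)) : PySem.Dict String (List (List String)) :=
  rows.foldl (fun d r => d.modify (pvCell r 1) [] (fun v => v ++ [r])) PySem.Dict.empty

def classementPays_alt (ordre1 : List (List String)) (ordre2 : List (List String)) : List (List String) :=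
  let a := PySem.List.slice ordre1 none (some (-1))
  let b := PySem.List.slice ordre2 none (some (-1))
  if a.isEmpty || b.isEmpty then []
  else if ordre1.length ≤ ordre2.length then
    let index := pvIndex a
    b.flatMap (fun r2 => (index.getD (pvCell r2 1) []).map
      (fun r1 => [pvCell r1 0, pvCell r2 0, pvCell r1 1]))
  else
    let index := pvIndex b
    a.flatMap (fun r1 => (index.getD (pvCell r1 1) []).map
      (fun r2 => [pvCell r1 0, pvCell r2 0, pvCell r1 1]))

-- ===== PRECONDITION & SPEC =====
-- Pre_ excludes exactly the inputs on which the Python A raises: when both scanned prefixes are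
-- nonempty A indexes every scanned row at [1] (IndexError on rows shorter than 2), and in the
-- len(ordre1) > len(ordre2) branch any match makes A read the undefined name 'element' (NameError).
def Pre_classementPays (ordre1 : List (List String)) (ordre2 : List (List String)) : Prop :=
  (2 ≤ ordre1.length ∧ 2 ≤ ordre2.length) →
    ((∀ r ∈ ordre1.dropLast, 2 ≤ r.length) ∧ (∀ r ∈ ordre2.dropLast, 2 ≤ r.length) ∧
     (ordre1.length ≤ ordre2.length ∨
      ∀ r1 ∈ ordre1.dropLast, ∀ r2 ∈ ordre2.dropLast, r2.getD 1 "" ≠ r1.getD 1 ""))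
instance (ordre1 : List (List String)) (ordre2 : List (List String)) : Decidable (Pre_classementPays ordre1 ordre2) := by unfold Pre_classementPays; infer_instance

def pvWitness_classementPays : List (List String) × List (List String) :=
  ([["a", "k"], ["x", "z"]], [["b", "k"], ["c", "q"], ["y", "w"]])

def Spec_classementPays (ordre1 : List (List String)) (ordre2 : List (List String)) (out : List (List String)) : Prop := out = classementPays_alt ordre1 ordre2
instance (ordre1 : List (List String)) (ordre2 : List (List String)) (out : List (List String)) : Decidable (Spec_classementPays ordre1 ordre2 out) := by unfold Spec_classementPays; infer_instance

-- ===== CLAIM (what is proved, stated in full; the proofs are below) =====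
def Claim_equal_classementPays : Prop := ∀ (ordre1 : List (List String)) (ordre2 : List (List String)), Dom_classementPays ordre1 ordre2 → Pre_classementPays ordre1 ordre2 → Spec_classementPays ordre1 ordre2 (classementPays ordre1 ordre2)

-- ===== LEMMAS AND PROOFS =====

-- range(0, len(xs) - 1) has the same elements as range(0, len(xs.dropLast))
theorem pvRange_pred {α : Type} (xs : List α) :
    PySem.List.pyRange 0 ((xs.length : Int) - 1) 1 =
      PySem.List.pyRange 0 ((xs.dropLast.length : Int)) 1 := by
  rw [PySem.List.pyRange_one, PySem.List.pyRange_one]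
  congr 2
  simp [List.length_dropLast]

theorem pvRow_dropLast (xs : List (List String)) {j : Int}
    (hj : j ∈ PySem.List.pyRange 0 ((xs.dropLast.length : Int)) 1) :
    pvRow xs j = PySem.List.pyGetD xs.dropLast j [] := by
  rw [PySem.List.mem_pyRange_one] at hj
  have hlt : j < (xs.dropLast.length : Int) := hj.2
  have hlt' : j < (xs.length : Int) := by
    have := xs.length_dropLast; omega
  rw [pvRow, PySem.List.pyGetD_eq_getElem xs [] hj.1 hlt',
      PySem.List.pyGetD_eq_getElem xs.dropLast [] hj.1 hlt]
  rw [List.getElem_dropLast]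

-- 'for j in range(0, len(xs)-1): out += G(xs[j])' is a flatMap over xs.dropLast
theorem pvFlatIdx {β : Type} (xs : List (List String)) (G : List String → List β) :
    (PySem.List.pyRange 0 ((xs.length : Int) - 1) 1).flatMap (fun j => G (pvRow xs j)) =
      xs.dropLast.flatMap G := by
  rw [pvRange_pred]
  conv_rhs => rw [← PySem.List.map_pyGetD_pyRange_zero' xs.dropLast []]
  rw [List.flatMap_def, List.flatMap_def, List.map_map]
  congr 1
  exact List.map_congr_left (fun j hj => by rw [pvRow_dropLast xs hj]; rfl)

-- the filtered-indices/map pattern over range(0, len(xs)-1) is a filter/map over xs.dropLast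
theorem pvFilterMapIdx {β : Type} (xs : List (List String)) (p : List String → Bool)
    (F : List String → β) :
    ((PySem.List.pyRange 0 ((xs.length : Int) - 1) 1).filter (fun j => p (pvRow xs j))).map
        (fun j => F (pvRow xs j)) =
      (xs.dropLast.filter p).map F := by
  rw [pvRange_pred]
  conv_rhs => rw [← PySem.List.map_pyGetD_pyRange_zero' xs.dropLast []]
  rw [List.filter_map, List.map_map]
  have hf : (PySem.List.pyRange 0 ((xs.dropLast.length : Int)) 1).filter
      (fun j => p (pvRow xs j)) =
      (PySem.List.pyRange 0 ((xs.dropLast.length : Int)) 1).filter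
      (fun j => (p ∘ fun j => PySem.List.pyGetD xs.dropLast j []) j) :=
    List.filter_congr (fun j hj => by simp [pvRow_dropLast xs hj])
  rw [hf]
  exact List.map_congr_left (fun j hj => by
    rw [pvRow_dropLast xs (List.mem_of_mem_filter hj)]; rfl)

-- the hash index looks up exactly the build-side rows with that key, in order
theorem pvIndex_getD (rows : List (List String)) (k : String) :
    (pvIndex rows).getD k [] = rows.filter (fun r => pvCell r 1 == k) := by
  have h : pvIndex rows =
      (rows.map (fun r => (pvCell r 1, r))).foldl
        (fun d p => d.modify p.1 [] (fun v => v ++ [p.2])) PySem.Dict.empty := by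
    rw [List.foldl_map]; rfl
  rw [h, PySem.Dict.getD_foldl_modify_append, List.filter_map, List.map_map]
  simp [Function.comp_def]

-- A's first branch as a hash-join-shaped flatMap
theorem pvA_branch1 (ordre1 ordre2 : List (List String)) (h : ordre1.length ≤ ordre2.length) :
    classementPays ordre1 ordre2 =
      ordre2.dropLast.flatMap (fun r2 =>
        (ordre1.dropLast.filter (fun r1 => pvCell r2 1 == pvCell r1 1)).map
          (fun r1 => [pvCell r1 0, pvCell r2 0, pvCell r1 1])) := by
  rw [classementPays, if_pos h]
  have hin : ∀ (cl : List (List String)) (e1 : Int),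
      (PySem.List.pyRange 0 ((ordre1.length : Int) - 1) 1).foldl (fun classement element2 =>
        if pvCell (pvRow ordre2 e1) 1 == pvCell (pvRow ordre1 element2) 1 then
          classement ++ [[pvCell (pvRow ordre1 element2) 0, pvCell (pvRow ordre2 e1) 0,
                          pvCell (pvRow ordre1 element2) 1]]
        else classement) cl =
      cl ++ (ordre1.dropLast.filter (fun r1 => pvCell (pvRow ordre2 e1) 1 == pvCell r1 1)).map
          (fun r1 => [pvCell r1 0, pvCell (pvRow ordre2 e1) 0, pvCell r1 1]) := by
    intro cl e1
    rw [PySem.List.foldl_append_if (fun element2 => pvCell (pvRow ordre2 e1) 1 == pvCell (pvRow ordre1 element2) 1)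
          (fun element2 => [pvCell (pvRow ordre1 element2) 0, pvCell (pvRow ordre2 e1) 0, pvCell (pvRow ordre1 element2) 1])]
    rw [pvFilterMapIdx ordre1 (fun r1 => pvCell (pvRow ordre2 e1) 1 == pvCell r1 1)
          (fun r1 => [pvCell r1 0, pvCell (pvRow ordre2 e1) 0, pvCell r1 1])]
  calc (PySem.List.pyRange 0 ((ordre2.length : Int) - 1) 1).foldl (fun classement element1 =>
        (PySem.List.pyRange 0 ((ordre1.length : Int) - 1) 1).foldl (fun classement element2 =>
          if pvCell (pvRow ordre2 element1) 1 == pvCell (pvRow ordre1 element2) 1 then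
            classement ++ [[pvCell (pvRow ordre1 element2) 0, pvCell (pvRow ordre2 element1) 0,
                            pvCell (pvRow ordre1 element2) 1]]
          else classement) classement) []
      = (PySem.List.pyRange 0 ((ordre2.length : Int) - 1) 1).foldl (fun classement element1 =>
          classement ++ (ordre1.dropLast.filter (fun r1 => pvCell (pvRow ordre2 element1) 1 == pvCell r1 1)).map
            (fun r1 => [pvCell r1 0, pvCell (pvRow ordre2 element1) 0, pvCell r1 1])) [] := by
        apply PySem.List.foldl_congr_mem
        intro acc x _
        exact hin acc x
    _ = (PySem.List.pyRange 0 ((ordre2.length : Int) - 1) 1).flatMap (fun e1 =>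
          (ordre1.dropLast.filter (fun r1 => pvCell (pvRow ordre2 e1) 1 == pvCell r1 1)).map
            (fun r1 => [pvCell r1 0, pvCell (pvRow ordre2 e1) 0, pvCell r1 1])) := by
        rw [PySem.List.foldl_append_eq_flatMap]; rfl
    _ = _ := pvFlatIdx ordre2 (fun r2 =>
          (ordre1.dropLast.filter (fun r1 => pvCell r2 1 == pvCell r1 1)).map
            (fun r1 => [pvCell r1 0, pvCell r2 0, pvCell r1 1]))

-- A's second branch likewise (with the placeholder third field)
theorem pvA_branch2 (ordre1 ordre2 : List (List String)) (h : ¬ ordre1.length ≤ ordre2.length) :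
    classementPays ordre1 ordre2 =
      ordre1.dropLast.flatMap (fun r1 =>
        (ordre2.dropLast.filter (fun r2 => pvCell r2 1 == pvCell r1 1)).map
          (fun r2 => [pvCell r1 0, pvCell r2 0, ""])) := by
  rw [classementPays, if_neg h]
  have hin : ∀ (cl : List (List String)) (e1 : Int),
      (PySem.List.pyRange 0 ((ordre2.length : Int) - 1) 1).foldl (fun classement element2 =>
        if pvCell (pvRow ordre2 element2) 1 == pvCell (pvRow ordre1 e1) 1 then
          classement ++ [[pvCell (pvRow ordre1 e1) 0, pvCell (pvRow ordre2 element2) 0, ""]]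
        else classement) cl =
      cl ++ (ordre2.dropLast.filter (fun r2 => pvCell r2 1 == pvCell (pvRow ordre1 e1) 1)).map
          (fun r2 => [pvCell (pvRow ordre1 e1) 0, pvCell r2 0, ""]) := by
    intro cl e1
    rw [PySem.List.foldl_append_if (fun element2 => pvCell (pvRow ordre2 element2) 1 == pvCell (pvRow ordre1 e1) 1)
          (fun element2 => [pvCell (pvRow ordre1 e1) 0, pvCell (pvRow ordre2 element2) 0, ""])]
    rw [pvFilterMapIdx ordre2 (fun r2 => pvCell r2 1 == pvCell (pvRow ordre1 e1) 1)
          (fun r2 => [pvCell (pvRow ordre1 e1) 0, pvCell r2 0, ""])]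
  calc (PySem.List.pyRange 0 ((ordre1.length : Int) - 1) 1).foldl (fun classement element1 =>
        (PySem.List.pyRange 0 ((ordre2.length : Int) - 1) 1).foldl (fun classement element2 =>
          if pvCell (pvRow ordre2 element2) 1 == pvCell (pvRow ordre1 element1) 1 then
            classement ++ [[pvCell (pvRow ordre1 element1) 0, pvCell (pvRow ordre2 element2) 0, ""]]
          else classement) classement) []
      = (PySem.List.pyRange 0 ((ordre1.length : Int) - 1) 1).foldl (fun classement element1 =>
          classement ++ (ordre2.dropLast.filter (fun r2 => pvCell r2 1 == pvCell (pvRow ordre1 element1) 1)).map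
            (fun r2 => [pvCell (pvRow ordre1 element1) 0, pvCell r2 0, ""])) [] := by
        apply PySem.List.foldl_congr_mem
        intro acc x _
        exact hin acc x
    _ = (PySem.List.pyRange 0 ((ordre1.length : Int) - 1) 1).flatMap (fun e1 =>
          (ordre2.dropLast.filter (fun r2 => pvCell r2 1 == pvCell (pvRow ordre1 e1) 1)).map
            (fun r2 => [pvCell (pvRow ordre1 e1) 0, pvCell r2 0, ""])) := by
        rw [PySem.List.foldl_append_eq_flatMap]; rfl
    _ = _ := pvFlatIdx ordre1 (fun r1 =>
          (ordre2.dropLast.filter (fun r2 => pvCell r2 1 == pvCell r1 1)).map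
            (fun r2 => [pvCell r1 0, pvCell r2 0, ""]))

theorem pvCell_one (r : List String) : pvCell r 1 = r.getD 1 "" := by
  simpa using PySem.List.pyGetD_ofNat' r 1 ""

-- ===== VERDICT (by name: the statement is the Claim_ definition above) =====
theorem classementPays_spec : Claim_equal_classementPays := by
  intro o1 o2 _ hpre
  unfold Spec_classementPays
  simp only [classementPays_alt, PySem.List.slice_to_neg_one, pvIndex_getD]
  by_cases ha : o1.dropLast = []
  · by_cases h : o1.length <= o2.length
    · rw [pvA_branch1 o1 o2 h]; simp [ha]
    · rw [pvA_branch2 o1 o2 h]; simp [ha]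
  · by_cases hb : o2.dropLast = []
    · by_cases h : o1.length <= o2.length
      · rw [pvA_branch1 o1 o2 h]; simp [hb]
      · rw [pvA_branch2 o1 o2 h]; simp [hb]
    · rw [if_neg (by simp [ha, hb])]
      have h1 : 2 <= o1.length := by
        have := o1.length_dropLast
        have : o1.dropLast.length ≠ 0 := fun hz => ha (List.eq_nil_of_length_eq_zero hz)
        omega
      have h2 : 2 <= o2.length := by
        have := o2.length_dropLast
        have : o2.dropLast.length ≠ 0 := fun hz => hb (List.eq_nil_of_length_eq_zero hz)
        omega
      by_cases h : o1.length <= o2.length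
      · rw [if_pos h, pvA_branch1 o1 o2 h]
        congr 1
        funext r2
        congr 1
        refine List.filter_congr (fun r1 _ => ?_)
        exact Bool.eq_iff_iff.mpr (by simp only [beq_iff_eq]; exact eq_comm)
      · rw [if_neg h, pvA_branch2 o1 o2 h]
        obtain ⟨_, _, hor⟩ := hpre ⟨h1, h2⟩
        have hnm : ∀ r1 ∈ o1.dropLast, ∀ r2 ∈ o2.dropLast, r2.getD 1 "" ≠ r1.getD 1 "" := by
          rcases hor with hle | hnm
          · exact absurd hle h
          · exact hnm
        have hfil : ∀ r1 ∈ o1.dropLast,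
            o2.dropLast.filter (fun r2 => pvCell r2 1 == pvCell r1 1) = [] := by
          intro r1 hr1
          refine List.filter_eq_nil_iff.mpr (fun r2 hr2 => ?_)
          simp only [pvCell_one, beq_iff_eq]
          exact hnm r1 hr1 r2 hr2
        calc o1.dropLast.flatMap (fun r1 =>
              (o2.dropLast.filter (fun r2 => pvCell r2 1 == pvCell r1 1)).map
                (fun r2 => [pvCell r1 0, pvCell r2 0, ""]))
            = [] := by
              refine List.flatMap_eq_nil_iff.mpr (fun r1 hr1 => ?_)
              rw [hfil r1 hr1]; rfl
          _ = o1.dropLast.flatMap (fun r1 =>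
              (o2.dropLast.filter (fun r2 => pvCell r2 1 == pvCell r1 1)).map
                (fun r2 => [pvCell r1 0, pvCell r2 0, pvCell r1 1])) := by
              refine (List.flatMap_eq_nil_iff.mpr (fun r1 hr1 => ?_)).symm
              rw [hfil r1 hr1]; rfl
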